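-- pv_equiv track=rewrite | github.com/t21services21/T21-RTT-Validator | rtt_validator.py | validate_nhs_number
-- ===== SOURCE A (Python) =====
-- def validate_nhs_number(nhs_number: str) -> bool:
--     """Validate NHS number using modulus 11 check digit algorithm"""
--     if not nhs_number or len(nhs_number) != 10 or not nhs_number.isdigit():
--         return False
--
--     # Modulus 11 algorithm
--     total = 0
--     for i in range(9):
--         total += int(nhs_number[i]) * (10 - i)
--
--     remainder = total % 11
--     check_digit = 11 - remainder
--
--     if check_digit == 11:
--         check_digit = 0
--
--     # Check digit must not be 10
--     if check_digit == 10: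
--         return False
--
--     return int(nhs_number[9]) == check_digit
-- ===== SOURCE B (Python) =====
-- def validate_nhs_number(nhs_number: str) -> bool:
--     """Validate NHS number using modulus 11 check digit algorithm"""
--     if not nhs_number or len(nhs_number) != 10 or not nhs_number.isdigit():
--         return False
--     # One weighted sum over all ten digits (weights 10..1); valid iff divisible by 11.
--     total = sum(int(d) * w for d, w in zip(nhs_number, range(10, 0, -1)))
--     return total % 11 == 0
-- ===== Notes on version B (the rewrite author's own statement) =====
-- stated objective: simpler
-- what changed: Replaces the 9-digit loop plus remainder/check-digit branching (including the check_digit==11 and ==10 special cases) with a single weighted sum over all ten digits tested for divisibility by 11.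
import Mathlib
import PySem

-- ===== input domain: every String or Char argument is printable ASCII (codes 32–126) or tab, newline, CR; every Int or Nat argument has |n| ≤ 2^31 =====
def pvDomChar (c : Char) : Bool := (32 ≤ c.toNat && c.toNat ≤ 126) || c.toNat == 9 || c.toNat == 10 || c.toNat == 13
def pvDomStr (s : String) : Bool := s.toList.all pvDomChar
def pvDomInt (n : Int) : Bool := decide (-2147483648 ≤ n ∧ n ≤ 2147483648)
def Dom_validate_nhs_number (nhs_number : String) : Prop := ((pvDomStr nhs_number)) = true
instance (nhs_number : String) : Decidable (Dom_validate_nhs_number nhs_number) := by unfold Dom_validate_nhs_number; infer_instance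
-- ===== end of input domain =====

-- B folds A's check-digit derivation and its special cases into one divisibility test; objective: simpler.

-- int(ch) for a single digit character; exact under the isdigit guard of both ports
def pvDigit (c : Char) : Int := (c.toNat : Int) - 48

-- ===== PORT A =====
def validate_nhs_number (nhs_number : String) : Bool :=
  let cs := nhs_number.toList
  if cs.isEmpty || cs.length != 10 || !(PySem.Chars.strIsdigit cs) then false
  else
    -- total = Σ_{i<9} int(cs[i]) * (10 - i)   (index i is in range under the length guard)
    let total := (PySem.List.pyRange 0 9 1).foldl
      (fun t i => t + pvDigit (PySem.List.pyGetD cs i ' ') * (10 - i)) 0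
    let remainder := PySem.Int.mod total 11
    let check_digit := 11 - remainder
    let check_digit := if check_digit = 11 then 0 else check_digit
    if check_digit = 10 then false
    else pvDigit (PySem.List.pyGetD cs 9 ' ') == check_digit

-- ===== PORT B =====
def validate_nhs_number_alt (nhs_number : String) : Bool :=
  let cs := nhs_number.toList
  if cs.isEmpty || cs.length != 10 || !(PySem.Chars.strIsdigit cs) then false
  else
    let total := ((cs.zip (PySem.List.pyRange 10 0 (-1))).map (fun p => pvDigit p.1 * p.2)).sum
    PySem.Int.mod total 11 == 0

-- ===== PRECONDITION & SPEC =====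
def Spec_validate_nhs_number (nhs_number : String) (out : Bool) : Prop := out = validate_nhs_number_alt nhs_number
instance (nhs_number : String) (out : Bool) : Decidable (Spec_validate_nhs_number nhs_number out) := by unfold Spec_validate_nhs_number; infer_instance

-- ===== CLAIM (what is proved, stated in full; the proofs are below) =====
def Claim_equal_validate_nhs_number : Prop := ∀ (nhs_number : String), Dom_validate_nhs_number nhs_number → Spec_validate_nhs_number nhs_number (validate_nhs_number nhs_number)

-- ===== LEMMAS AND PROOFS =====

lemma pvDigit_bounds {c : Char} (h : PySem.Chars.isdigit c = true) :
    0 ≤ pvDigit c ∧ pvDigit c ≤ 9 := by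
  have h' : 48 ≤ c.toNat ∧ c.toNat ≤ 57 := by
    simp [PySem.Chars.isdigit, Char.le_def, UInt32.le_iff_toNat_le] at h
    simp only [Char.toNat]; exact h
  simp only [pvDigit]; omega

-- A's branchy check-digit comparison equals B's divisibility test, for a digit d ∈ [0,9].
lemma pv_key (S T d : Int) (hd0 : 0 ≤ d) (hd9 : d ≤ 9) (hT : T = S + d) :
    ((!decide ((if S.fmod 11 = 0 then 0 else 11 - S.fmod 11) = 10)) &&
      (d == if S.fmod 11 = 0 then 0 else 11 - S.fmod 11))
    = (T.fmod 11 == 0) := by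
  subst hT
  have hf : ∀ a : Int, a.fmod 11 = a % 11 := fun a => by rw [Int.fmod_eq_emod]; simp
  rw [hf, hf]
  apply Bool.eq_iff_iff.mpr
  simp only [Bool.and_eq_true, Bool.not_eq_true', decide_eq_false_iff_not, beq_iff_eq]
  split_ifs with h <;> omega

-- ===== VERDICT (by name: the statement is the Claim_ definition above) =====
theorem validate_nhs_number_spec : Claim_equal_validate_nhs_number := by
  intro s _hd
  unfold Spec_validate_nhs_number validate_nhs_number validate_nhs_number_alt
  set cs := s.toList with hcs
  by_cases hg : (cs.isEmpty || cs.length != 10 || !(PySem.Chars.strIsdigit cs)) = true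
  · simp [hg]
  · simp only [Bool.not_eq_true] at hg
    simp only [hg, if_neg Bool.false_ne_true]
    simp only [Bool.or_eq_false_iff, Bool.not_eq_false', bne_eq_false_iff_eq] at hg
    obtain ⟨⟨-, hlen⟩, hdig⟩ := hg
    match cs, hlen with
    | [c0,c1,c2,c3,c4,c5,c6,c7,c8,c9], _ =>
      simp [PySem.Chars.strIsdigit] at hdig
      obtain ⟨h0,h1,h2,h3,h4,h5,h6,h7,h8,h9⟩ := hdig
      have b0 := pvDigit_bounds h0; have b9 := pvDigit_bounds h9
      have b1 := pvDigit_bounds h1; have b2 := pvDigit_bounds h2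
      have b3 := pvDigit_bounds h3; have b4 := pvDigit_bounds h4
      have b5 := pvDigit_bounds h5; have b6 := pvDigit_bounds h6
      have b7 := pvDigit_bounds h7; have b8 := pvDigit_bounds h8
      have hr9 : PySem.List.pyRange 0 9 1 = [0,1,2,3,4,5,6,7,8] := by decide
      have hr10 : PySem.List.pyRange 10 0 (-1) = [10,9,8,7,6,5,4,3,2,1] := by decide
      rw [hr9, hr10]
      norm_num [PySem.List.pyGetD, PySem.List.pyGet?, PySem.List.pyIdx?, PySem.Int.mod,
        List.foldl, List.zip, List.zipWith]
      apply pv_key <;> simp <;> omega
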